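-- pv_equiv track=rewrite | github.com/Moonhalf383/CS61A-homeworks | notes/data_examples.py | dict_map
-- ===== SOURCE A (Python) =====
-- def dict_map(l):
--     ans_dict = {}
--     for element in l:
--         if element%10 not in ans_dict:
--             ans_dict[element%10] = [element]
--         else:
--             ans_dict[element%10].append(element)
--     return ans_dict
-- ===== SOURCE B (Python) =====
-- def dict_map(l):
--     keys = list(dict.fromkeys(x % 10 for x in l))
--     return {k: [x for x in l if x % 10 == k] for k in keys}
-- ===== Notes on version B (the rewrite author's own statement) =====
-- stated objective: idiomatic
-- what changed: Replaces the single-pass dict-of-lists append loop by a two-phase comprehension: dedup the residues mod 10 in first-occurrence order (dict.fromkeys), then build each group with a per-key filter over the list.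
import Mathlib
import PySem

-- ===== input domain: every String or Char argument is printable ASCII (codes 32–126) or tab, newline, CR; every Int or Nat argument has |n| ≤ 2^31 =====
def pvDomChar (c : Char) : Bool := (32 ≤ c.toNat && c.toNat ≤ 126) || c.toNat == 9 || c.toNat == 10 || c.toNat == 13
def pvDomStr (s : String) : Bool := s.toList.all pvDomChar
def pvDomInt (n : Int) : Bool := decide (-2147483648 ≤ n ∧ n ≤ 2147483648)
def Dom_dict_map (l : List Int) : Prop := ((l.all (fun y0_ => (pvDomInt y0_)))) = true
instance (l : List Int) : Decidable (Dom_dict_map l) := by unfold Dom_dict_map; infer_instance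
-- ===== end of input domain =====

-- B groups l by residue mod 10 via an ordered key dedup plus a per-key filter comprehension,
-- instead of A's single-pass dict-of-lists append loop; same return value, no mutation.
-- ===== PORT A =====
def dict_map (l : List Int) : List (Int × List Int) :=
  (l.foldl (fun d x =>
      if d.contains (PySem.Int.mod x 10) = false then
        d.insert (PySem.Int.mod x 10) [x]
      else
        d.modify (PySem.Int.mod x 10) [] (fun v => v ++ [x]))
    PySem.Dict.empty).items

-- ===== PORT B =====
def dict_map_alt (l : List Int) : List (Int × List Int) :=
  (PySem.List.dedup (l.map (fun x => PySem.Int.mod x 10))).map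
    (fun k => (k, l.filter (fun x => PySem.Int.mod x 10 == k)))

-- ===== PRECONDITION & SPEC =====
def Spec_dict_map (l : List Int) (out : List (Int × List Int)) : Prop := out = dict_map_alt l
instance (l : List Int) (out : List (Int × List Int)) : Decidable (Spec_dict_map l out) := by unfold Spec_dict_map; infer_instance

-- ===== CLAIM (what is proved, stated in full; the proofs are below) =====
def Claim_equal_dict_map : Prop := ∀ (l : List Int), Dom_dict_map l → Spec_dict_map l (dict_map l)

-- ===== LEMMAS AND PROOFS =====

-- modifying an absent key with default [] is exactly inserting the appended value
theorem dict_map_modify_absent (d : PySem.Dict Int (List Int)) (k : Int) (v : List Int)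
    (h : d.contains k = false) : d.modify k [] (fun w => w ++ v) = d.insert k v := by
  apply PySem.Dict.ext
  rw [PySem.Dict.contains_eq_isSome_get?] at h
  simp [PySem.Dict.modify, PySem.Dict.insert, PySem.Dict.getD, Option.isSome_eq_false_iff,
    Option.isNone_iff_eq_none] at *
  simp [h]

-- ===== VERDICT (by name: the statement is the Claim_ definition above) =====
theorem dict_map_spec : Claim_equal_dict_map := by
  intro l _
  unfold Spec_dict_map dict_map dict_map_alt
  -- A's branching loop step is a single Dict.modify
  have hcong : l.foldl (fun d x =>
      if d.contains (PySem.Int.mod x 10) = false then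
        d.insert (PySem.Int.mod x 10) [x]
      else
        d.modify (PySem.Int.mod x 10) [] (fun v => v ++ [x])) PySem.Dict.empty
      = l.foldl (fun d x => d.modify (PySem.Int.mod x 10) [] (fun v => v ++ [x])) PySem.Dict.empty := by
    apply PySem.List.foldl_congr_mem
    intro d x _
    by_cases h : d.contains (PySem.Int.mod x 10) = false
    · rw [if_pos h, dict_map_modify_absent _ _ _ h]
    · rw [if_neg h]
  rw [hcong]
  set D := l.foldl (fun d x => d.modify (PySem.Int.mod x 10) [] (fun v => v ++ [x])) PySem.Dict.empty with hD
  have hnd : D.keys.Nodup := by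
    apply PySem.Dict.nodup_keys_foldl_modify_key
    simp
  have hkeys : D.keys = PySem.List.dedup (l.map (fun x => PySem.Int.mod x 10)) := by
    rw [hD, PySem.Dict.keys_foldl_modify_key]
    simp [PySem.Set.update_nil_left]
  have hget : ∀ k, D.getD k [] = l.filter (fun x => PySem.Int.mod x 10 == k) := by
    intro k
    have hm := List.foldl_map (f := fun x : Int => (PySem.Int.mod x 10, x))
      (g := fun (d : PySem.Dict Int (List Int)) (p : Int × Int) => d.modify p.1 [] (fun v => v ++ [p.2]))
      (l := l) (init := PySem.Dict.empty)
    rw [hD, ← hm, PySem.Dict.getD_foldl_modify_append]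
    simp [List.filter_map, Function.comp_def]
  rw [PySem.Dict.items_eq_map_keys D hnd [], hkeys]
  exact List.map_congr_left (fun k _ => by rw [hget k])
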